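-- pv_equiv track=rewrite | github.com/S-anonD/GFG_Problem-of-the-Day | Difficulty: Medium/Group Balls by Sequence/group-balls-by-sequence.py | validgroup
-- ===== SOURCE A (Python) =====
-- from collections import defaultdict
--
-- def validgroup(arr ,k):
--     n = len(arr)
--     map = defaultdict(int)
--     for val in arr:
--         map[val] += 1
--     for val in sorted(map.keys()):
--         freq = map.get(val, 0)
--         if freq == 0:
--             continue
--         for i in range(1, k):
--             v = val + i
--             f = map.get(v, 0)
--             if f < freq:
--                 return False
--             map[v] -= freq
--     return True
-- ===== SOURCE B (Python) =====
-- from collections import Counter, deque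
--
--
-- def validgroup(arr, k):
--     cnt = Counter(arr)
--     keys = sorted(cnt)
--     starts = []        # number of sequences that must start at each key, in key order
--     win = deque()      # (u, starts_u) for keys u still inside the window (v-k, v)
--     S = 0              # sum of the start counts currently in win
--     for v in keys:
--         while win and win[0][0] <= v - k:
--             S -= win.popleft()[1]
--         s = cnt[v] - S
--         if s < 0:
--             return False
--         starts.append(s)
--         win.append((v, s))
--         S += s
--     for v, s in zip(keys, starts):
--         if s > 0:
--             for j in range(1, k):
--                 if v + j not in cnt:
--                     return False
--     return True
-- ===== Notes on version B (the rewrite author's own statement) =====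
-- stated objective: alternative
-- what changed: A walks the sorted distinct values destructively decrementing the counts of the next k-1 values with an inner k-loop; B never mutates the counts: one pass over the sorted distinct values computes the number of sequences forced to start at each value from a sliding-window sum maintained in a deque (no inner k-loop), and a second pass checks that every positive start has its k-1 successors present.
import Mathlib
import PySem

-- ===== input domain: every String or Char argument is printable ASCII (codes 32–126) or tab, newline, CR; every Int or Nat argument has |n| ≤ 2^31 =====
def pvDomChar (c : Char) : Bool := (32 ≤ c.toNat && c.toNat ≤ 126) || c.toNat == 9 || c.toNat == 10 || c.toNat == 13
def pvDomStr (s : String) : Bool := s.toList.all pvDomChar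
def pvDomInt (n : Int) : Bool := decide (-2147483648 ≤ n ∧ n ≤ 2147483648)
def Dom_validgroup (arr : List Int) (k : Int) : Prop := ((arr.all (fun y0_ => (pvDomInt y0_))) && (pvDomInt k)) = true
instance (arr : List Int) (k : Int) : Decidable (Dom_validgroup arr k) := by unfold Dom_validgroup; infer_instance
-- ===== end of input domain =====

-- B computes per-value sequence-start counts via a backward window sum (no mutation of the counts)
-- plus a separate coverage pass, instead of A's forward destructive decrements; same cost, alternative algorithm.

-- ===== PORT A =====
-- inner 'for i in range(1, k)' loop, iterated lazily (i = current index, fuel = k-1 remaining steps,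
-- exactly like Python's range object); returns none on 'return False', else the updated dict
def aInner (m : PySem.Dict Int Int) (val freq : Int) : Int → Nat → Option (PySem.Dict Int Int)
  | _, 0 => some m
  | i, fuel + 1 =>
    let v := val + i
    let f := m.getD v 0
    if f < freq then none
    else aInner (m.insert v (f - freq)) val freq (i + 1) fuel

-- outer 'for val in sorted(map.keys())' loop
def aOuter (k : Int) : List Int → PySem.Dict Int Int → Bool
  | [], _ => true
  | val :: rest, m =>
    let freq := m.getD val 0
    if freq == 0 then aOuter k rest m
    else
      match aInner m val freq 1 (k - 1).toNat with
      | none => false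
      | some m' => aOuter k rest m'

def validgroup (arr : List Int) (k : Int) : Bool :=
  let m := arr.foldl (fun d val => d.modify val 0 (· + 1)) PySem.Dict.empty
  aOuter k (PySem.List.sorted m.keys (fun x => x) false) m

-- ===== PORT B =====
-- 'while win and win[0][0] <= t: S -= win.popleft()[1]' : pop expired window entries
def bPop (t : Int) : List (Int × Int) → Int → (List (Int × Int) × Int)
  | [], S => ([], S)
  | (u, su) :: rest, S => if u ≤ t then bPop t rest (S - su) else ((u, su) :: rest, S)

-- first pass: start count s = cnt[v] - S (S = window sum of recent start counts)
def bFirst (cnt : PySem.Dict Int Int) (k : Int) :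
    List Int → List (Int × Int) → Int → List Int → Option (List Int)
  | [], _, _, starts => some starts
  | v :: rest, win, S, starts =>
    let p := bPop (v - k) win S
    let s := cnt.getD v 0 - p.2
    if s < 0 then none
    else bFirst cnt k rest (p.1 ++ [(v, s)]) (p.2 + s) (starts ++ [s])

-- 'for j in range(1, k): if v + j not in cnt: return False', iterated lazily like Python's range
def bCover (cnt : PySem.Dict Int Int) (v : Int) : Int → Nat → Bool
  | _, 0 => true
  | j, fuel + 1 =>
    if !(cnt.contains (v + j)) then false
    else bCover cnt v (j + 1) fuel

-- second pass: every positive start must have its k-1 successors present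
def bSecond (cnt : PySem.Dict Int Int) (k : Int) : List (Int × Int) → Bool
  | [] => true
  | (v, s) :: rest =>
    if 0 < s then
      if bCover cnt v 1 (k - 1).toNat then bSecond cnt k rest
      else false
    else bSecond cnt k rest

def validgroup_alt (arr : List Int) (k : Int) : Bool :=
  let cnt := PySem.Dict.counter arr
  let keys := PySem.List.sorted cnt.keys (fun x => x) false
  match bFirst cnt k keys [] 0 [] with
  | none => false
  | some starts => bSecond cnt k (keys.zip starts)

-- ===== PRECONDITION & SPEC =====
def Spec_validgroup (arr : List Int) (k : Int) (out : Bool) : Prop := out = validgroup_alt arr k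
instance (arr : List Int) (k : Int) (out : Bool) : Decidable (Spec_validgroup arr k out) := by unfold Spec_validgroup; infer_instance

-- ===== CLAIM (what is proved, stated in full; the proofs are below) =====
def Claim_equal_validgroup : Prop := ∀ (arr : List Int) (k : Int), Dom_validgroup arr k → Spec_validgroup arr k (validgroup arr k)

-- ===== LEMMAS AND PROOFS =====

-- the number of length-k sequences forced to start at each value: start(v) = c(v) - Σ_{j=1}^{k-1} start(v-j),
-- realised as a fold over the ascending key list (one point set per step)
def vgStep (c : Int → Int) (k : Int) (g : Int → Int) (v : Int) : Int → Int :=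
  fun w => if w = v then c v - ((PySem.List.pyRange 1 k 1).map (fun j => g (v - j))).sum else g w

def vgR (c : Int → Int) (k : Int) (l : List Int) : Int → Int :=
  l.foldl (vgStep c k) (fun _ => 0)

-- A's dict after processing prefix pfx, as a pure function
def vgM (c : Int → Int) (k : Int) (R : Int → Int) (pfx : List Int) (w : Int) : Int :=
  c w - (pfx.map (fun u => if (w - u) ∈ PySem.List.pyRange 1 k 1 then R u else 0)).sum

-- B's characterisation: all start counts nonnegative, every positive start covered
def vgGoodP (c : Int → Int) (k : Int) (ks : List Int) : Prop :=
  (∀ v ∈ ks, 0 ≤ vgR c k ks v) ∧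
  (∀ v ∈ ks, 0 < vgR c k ks v → ∀ j ∈ PySem.List.pyRange 1 k 1, v + j ∈ ks)

-- A's characterisation: every check of the inner loop passes
def vgGoodQ (c : Int → Int) (k : Int) (ks : List Int) : Prop :=
  ∀ pfx v suf, ks = pfx ++ v :: suf → vgR c k ks v ≠ 0 →
    ∀ i ∈ PySem.List.pyRange 1 k 1, vgR c k ks v ≤ vgM c k (vgR c k ks) pfx (v + i)

-- proof-only list-indexed version of A's inner loop (the fuel recursion walks the same indices)
def aInnerL (m : PySem.Dict Int Int) (val freq : Int) : List Int → Option (PySem.Dict Int Int)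
  | [] => some m
  | i :: rest =>
    let v := val + i
    let f := m.getD v 0
    if f < freq then none
    else aInnerL (m.insert v (f - freq)) val freq rest

theorem pyRange_nil {a b : Int} (h : b ≤ a) : PySem.List.pyRange a b 1 = [] := by
  have hlen : (PySem.List.pyRange a b 1).length = 0 := by
    rw [PySem.List.length_pyRange_one]; omega
  exact List.eq_nil_of_length_eq_zero hlen

theorem aInner_eq_list (val freq : Int) : ∀ (fuel : Nat) (i : Int) (m : PySem.Dict Int Int),
    aInner m val freq i fuel = aInnerL m val freq (PySem.List.pyRange i (i + (fuel : Int)) 1) := by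
  intro fuel
  induction fuel with
  | zero =>
    intro i m
    rw [pyRange_nil (by simp)]
    rfl
  | succ fuel ih =>
    intro i m
    have hcons : PySem.List.pyRange i (i + ((fuel + 1 : Nat) : Int)) 1
        = i :: PySem.List.pyRange (i + 1) (i + ((fuel + 1 : Nat) : Int)) 1 :=
      PySem.List.pyRange_one_cons (by push_cast; omega)
    have harg : i + ((fuel + 1 : Nat) : Int) = (i + 1) + ((fuel : Nat) : Int) := by
      push_cast; ring
    rw [hcons, harg]
    simp only [aInner, aInnerL]
    by_cases hlt : m.getD (val + i) 0 < freq
    · simp [hlt]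
    · simp [hlt, ih]

theorem range_shift (k : Int) :
    PySem.List.pyRange 1 (1 + (((k - 1).toNat : Nat) : Int)) 1 = PySem.List.pyRange 1 k 1 := by
  by_cases hk : 1 ≤ k
  · have h1 : 1 + (((k - 1).toNat : Nat) : Int) = k := by omega
    rw [h1]
  · have h1 : (k - 1).toNat = 0 := by omega
    rw [h1, pyRange_nil (by simp), pyRange_nil (by omega)]

theorem bCover_eq (cnt : PySem.Dict Int Int) (v : Int) :
    ∀ (fuel : Nat) (j : Int), bCover cnt v j fuel
      = !((PySem.List.pyRange j (j + (fuel : Int)) 1).any (fun i => !(cnt.contains (v + i)))) := by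
  intro fuel
  induction fuel with
  | zero =>
    intro j
    rw [pyRange_nil (by simp)]
    rfl
  | succ fuel ih =>
    intro j
    have hcons : PySem.List.pyRange j (j + ((fuel + 1 : Nat) : Int)) 1
        = j :: PySem.List.pyRange (j + 1) (j + ((fuel + 1 : Nat) : Int)) 1 :=
      PySem.List.pyRange_one_cons (by push_cast; omega)
    have harg : j + ((fuel + 1 : Nat) : Int) = (j + 1) + ((fuel : Nat) : Int) := by
      push_cast; ring
    rw [hcons, harg]
    simp only [bCover, List.any_cons]
    by_cases hc : cnt.contains (v + j)
    · simp [hc, ih]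
    · simp [hc]

-- sum of an if-then-else map is the sum over the filtered list
theorem sum_map_ite_filter (l : List Int) (p : Int → Prop) [DecidablePred p] (f : Int → Int) :
    (l.map (fun u => if p u then f u else 0)).sum
      = ((l.filter (fun u => decide (p u))).map f).sum := by
  induction l with
  | nil => rfl
  | cons a t ih =>
    by_cases hp : p a
    · simp [hp, ih]
    · simp [hp, ih]

theorem sum_map_filter_split (l : List Int) (p : Int → Bool) (f : Int → Int) :
    ((l.filter p).map f).sum + ((l.filter (fun u => !(p u))).map f).sum = (l.map f).sum := by
  induction l with
  | nil => rfl
  | cons a t ih =>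
    rcases Bool.eq_false_or_eq_true (p a) with hp | hp <;>
      simp [hp] <;> omega

-- popping from an ascending window list drops exactly the expired entries
theorem bPop_spec (t : Int) : ∀ (w : List (Int × Int)) (S : Int),
    w.Pairwise (fun p q => p.1 < q.1) →
    bPop t w S = (w.filter (fun q => decide (t < q.1)),
      S - ((w.filter (fun q => decide (q.1 ≤ t))).map (·.2)).sum) := by
  intro w
  induction w with
  | nil => intro S _; simp [bPop]
  | cons p rest ih =>
    intro S hpw
    rcases p with ⟨u, su⟩
    rcases List.pairwise_cons.mp hpw with ⟨hhd, htl⟩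
    by_cases hu : u ≤ t
    · have h1 : decide (t < u) = false := by simp; omega
      have h2 : decide (u ≤ t) = true := by simpa using hu
      simp only [bPop, if_pos hu, List.filter_cons]
      rw [ih (S - su) htl]
      simp [h1, h2]
      omega
    · have h1 : decide (t < u) = true := by simp; omega
      have h2 : decide (u ≤ t) = false := by simpa using hu
      have hrest1 : rest.filter (fun q => decide (t < q.1)) = rest :=
        List.filter_eq_self.mpr (fun q hq => by
          have := hhd q hq
          simp
          omega)
      have hrest2 : rest.filter (fun q => decide (q.1 ≤ t)) = [] :=
        List.filter_eq_nil_iff.mpr (fun q hq => by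
          have := hhd q hq
          simp
          omega)
      simp only [bPop, if_neg hu, List.filter_cons, h1, h2]
      simp [hrest1, hrest2]

theorem vgR_not_mem (c : Int → Int) (k : Int) (l : List Int) (g : Int → Int) (w : Int)
    (h : w ∉ l) : l.foldl (vgStep c k) g w = g w := by
  induction l generalizing g with
  | nil => rfl
  | cons a t ih =>
    have hw : w ≠ a ∧ w ∉ t := by simpa using h
    simp only [List.foldl_cons]
    rw [ih _ hw.2]
    simp [vgStep, hw.1]

theorem vgR_zero_of_not_mem (c : Int → Int) (k : Int) (ks : List Int) (w : Int)
    (h : w ∉ ks) : vgR c k ks w = 0 := by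
  unfold vgR
  exact vgR_not_mem c k ks _ w h

theorem vgR_prefix (c : Int → Int) (k : Int) {l1 l2 : List Int} {w : Int}
    (h : w ∉ l2) : vgR c k (l1 ++ l2) w = vgR c k l1 w := by
  simp only [vgR, List.foldl_append]
  exact vgR_not_mem c k l2 _ w h

theorem vgR_decomp (c : Int → Int) (k : Int) {ks pfx suf : List Int} {v : Int}
    (hnd : ks.Nodup) (h : ks = pfx ++ v :: suf) :
    vgR c k ks v = c v - ((PySem.List.pyRange 1 k 1).map (fun j => vgR c k pfx (v - j))).sum := by
  have hvs : v ∉ suf := by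
    rw [h] at hnd
    have hv := (List.pairwise_cons.mp (List.nodup_middle.mp hnd)).1
    intro hmem
    exact hv v (List.mem_append_right pfx hmem) rfl
  rw [vgR, h, List.foldl_append, List.foldl_cons, vgR_not_mem c k suf _ v hvs]
  simp [vgStep, vgR]

theorem vgR_window (c : Int → Int) (k : Int) {ks pfx suf : List Int} {v : Int}
    (hsort : ks.Pairwise (· < ·)) (h : ks = pfx ++ v :: suf) :
    vgR c k ks v = c v - ((PySem.List.pyRange 1 k 1).map (fun j => vgR c k ks (v - j))).sum := by
  have hnd : ks.Nodup := hsort.imp ne_of_lt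
  rw [vgR_decomp c k hnd h]
  congr 1
  refine congrArg _ (List.map_congr_left ?_)
  intro j hj
  have hj1 : 1 ≤ j := (PySem.List.mem_pyRange_one.mp hj).1
  have hge : ∀ x ∈ v :: suf, v ≤ x := by
    intro x hx
    rcases List.mem_cons.mp hx with h1 | h1
    · omega
    · rw [h] at hsort
      have := (List.pairwise_cons.mp (List.pairwise_append.mp hsort).2.1).1 x h1
      omega
  have hnm : v - j ∉ v :: suf := by
    intro hmem
    have := hge _ hmem
    omega
  rw [h]
  exact (vgR_prefix c k hnm).symm

theorem vgM_append_singleton (c : Int → Int) (k : Int) (R : Int → Int) (pfx : List Int) (u w : Int) :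
    vgM c k R (pfx ++ [u]) w =
      vgM c k R pfx w - (if (w - u) ∈ PySem.List.pyRange 1 k 1 then R u else 0) := by
  simp [vgM]
  ring

-- the backward j-indexed window sum equals the u-indexed sum over the processed prefix
theorem vgM_self (c : Int → Int) (k : Int) {ks pfx suf : List Int} {v : Int}
    (hsort : ks.Pairwise (· < ·)) (h : ks = pfx ++ v :: suf) :
    vgM c k (vgR c k ks) pfx v = vgR c k ks v := by
  have hnd : ks.Nodup := hsort.imp ne_of_lt
  have hndp : pfx.Nodup := by
    rw [h] at hnd; exact (List.nodup_append.mp hnd).1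
  have hndr : (PySem.List.pyRange 1 k 1).Nodup := PySem.List.nodup_pyRange_one 1 k
  have hcov : ∀ j ∈ PySem.List.pyRange 1 k 1, vgR c k ks (v - j) ≠ 0 → (v - j) ∈ pfx := by
    intro j hj hR
    have hj1 : 1 ≤ j := (PySem.List.mem_pyRange_one.mp hj).1
    have hks : (v - j) ∈ ks := by
      by_contra hc
      exact hR (vgR_zero_of_not_mem c k ks _ hc)
    rw [h] at hks
    rcases List.mem_append.mp hks with h1 | h1
    · exact h1
    · exfalso
      rcases List.mem_cons.mp h1 with h2 | h2
      · omega
      · rw [h] at hsort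
        have := (List.pairwise_cons.mp (List.pairwise_append.mp hsort).2.1).1 _ h2
        omega
  rw [vgR_window c k hsort h, vgM]
  congr 1
  rw [← List.sum_toFinset _ hndp, ← List.sum_toFinset _ hndr,
      ← Finset.sum_filter (fun u => (v - u) ∈ PySem.List.pyRange 1 k 1) (fun u => vgR c k ks u)]
  rw [← Finset.sum_filter_of_ne (f := fun j => vgR c k ks (v - j))
        (p := fun j => (v - j) ∈ pfx)
        (by intro j hj hne; exact hcov j (List.mem_toFinset.mp hj) hne)]
  refine Finset.sum_nbij' (fun u => v - u) (fun j => v - j) ?_ ?_ ?_ ?_ ?_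
  · intro u hu
    rcases Finset.mem_filter.mp hu with ⟨hu1, hu2⟩
    refine Finset.mem_filter.mpr ⟨List.mem_toFinset.mpr hu2, ?_⟩
    simpa using List.mem_toFinset.mp hu1
  · intro j hj
    rcases Finset.mem_filter.mp hj with ⟨hj1, hj2⟩
    refine Finset.mem_filter.mpr ⟨List.mem_toFinset.mpr hj2, ?_⟩
    simpa using List.mem_toFinset.mp hj1
  · intro u _; ring
  · intro j _; ring
  · intro u _; norm_num

theorem vg_sorted_lt (arr : List Int) :
    (PySem.List.sorted (PySem.Set.ofList arr) (fun x => x) false).Pairwise (· < ·) := by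
  have h1 := PySem.List.sorted_pairwise (PySem.Set.ofList arr) (fun x => x)
  have h2 : (PySem.List.sorted (PySem.Set.ofList arr) (fun x => x) false).Nodup :=
    (PySem.List.sorted_perm (PySem.Set.ofList arr) (fun x => x) false).nodup_iff.mpr
      (PySem.Set.nodup_ofList arr)
  exact (h1.and h2).imp (fun hab => lt_of_le_of_ne hab.1 hab.2)

theorem vg_sorted_mem (arr : List Int) (w : Int) :
    w ∈ PySem.List.sorted (PySem.Set.ofList arr) (fun x => x) false ↔ w ∈ arr := by
  rw [(PySem.List.sorted_perm (PySem.Set.ofList arr) (fun x => x) false).mem_iff]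
  exact PySem.Set.mem_ofList arr w

-- decompositions of a cons split into the head case and shifted tail cases
theorem vg_decomp_shift (A : List Int → Int → List Int → Prop) (val : Int) (rest' : List Int) :
    (∀ p2 v suf, val :: rest' = p2 ++ v :: suf → A p2 v suf) ↔
      (A [] val rest' ∧ ∀ p2 v suf, rest' = p2 ++ v :: suf → A (val :: p2) v suf) := by
  constructor
  · intro h
    exact ⟨h [] val rest' rfl, fun p2 v suf hd => h (val :: p2) v suf (by rw [hd]; rfl)⟩
  · rintro ⟨h1, h2⟩ p2 v suf hd
    cases p2 with
    | nil =>
      have hv : val = v ∧ rest' = suf := by simpa using hd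
      rcases hv with ⟨hv1, hv2⟩
      subst hv1; subst hv2
      exact h1
    | cons a p2' =>
      have ha : val = a ∧ rest' = p2' ++ v :: suf := by simpa using hd
      rcases ha with ⟨ha1, ha2⟩
      subst ha1
      exact h2 p2' v suf ha2

-- ===== A-side characterisation =====
theorem aInnerL_char (k : Int) (M : Int → Int) (val freq : Int) :
    ∀ rs done (m : PySem.Dict Int Int), PySem.List.pyRange 1 k 1 = done ++ rs →
    (∀ w, m.getD w 0 = M w - (if (w - val) ∈ done then freq else 0)) →
    ((∃ m', aInnerL m val freq rs = some m' ∧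
        ∀ w, m'.getD w 0 = M w - (if (w - val) ∈ PySem.List.pyRange 1 k 1 then freq else 0)) ∧
      (∀ i ∈ rs, freq ≤ M (val + i)))
    ∨ (aInnerL m val freq rs = none ∧ ¬ (∀ i ∈ rs, freq ≤ M (val + i))) := by
  intro rs
  induction rs with
  | nil =>
    intro done m hrng hinv
    left
    refine ⟨⟨m, rfl, ?_⟩, by simp⟩
    intro w
    rw [hinv w, hrng]
    simp
  | cons i rs' ih =>
    intro done m hrng hinv
    have hndall : (done ++ i :: rs').Nodup := by
      rw [← hrng]; exact PySem.List.nodup_pyRange_one 1 k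
    have hidone : i ∉ done := by
      have hh := (List.pairwise_cons.mp (List.nodup_middle.mp hndall)).1
      intro hmem
      exact hh i (List.mem_append_left _ hmem) rfl
    have hvi : val + i - val = i := by ring
    have hf : m.getD (val + i) 0 = M (val + i) := by
      rw [hinv (val + i), hvi, if_neg hidone]
      ring
    by_cases hlt : m.getD (val + i) 0 < freq
    · right
      constructor
      · simp [aInnerL, hlt]
      · intro hall
        have := hall i List.mem_cons_self
        rw [hf] at hlt
        omega
    · have hstep : aInnerL m val freq (i :: rs')
          = aInnerL (m.insert (val + i) (m.getD (val + i) 0 - freq)) val freq rs' := by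
        simp [aInnerL, hlt]
      have hinv' : ∀ w, (m.insert (val + i) (m.getD (val + i) 0 - freq)).getD w 0
          = M w - (if (w - val) ∈ done ++ [i] then freq else 0) := by
        intro w
        rw [PySem.Dict.getD_insert]
        by_cases hw : w = val + i
        · rw [if_pos hw, hf, hw, hvi, if_pos (by simp)]
        · rw [if_neg hw, hinv w]
          by_cases hm : w - val ∈ done
          · rw [if_pos hm, if_pos (List.mem_append_left _ hm)]
          · rw [if_neg hm, if_neg ?_]
            intro hc
            rcases List.mem_append.mp hc with h1 | h1
            · exact hm h1
            · have : w - val = i := by simpa using h1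
              exact hw (by omega)
      have hrng' : PySem.List.pyRange 1 k 1 = (done ++ [i]) ++ rs' := by
        rw [hrng]; simp
      rcases ih (done ++ [i]) _ hrng' hinv' with ⟨⟨m', hm', hfin⟩, hpass⟩ | ⟨hnone, hfail⟩
      · left
        refine ⟨⟨m', by rw [hstep]; exact hm', hfin⟩, ?_⟩
        intro i' hi'
        rcases List.mem_cons.mp hi' with h1 | h1
        · subst h1; rw [← hf]; omega
        · exact hpass i' h1
      · right
        refine ⟨by rw [hstep]; exact hnone, ?_⟩
        intro hall
        exact hfail (fun x hx => hall x (List.mem_cons_of_mem _ hx))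

theorem aOuter_char (c : Int → Int) (k : Int) (ks : List Int)
    (hsort : ks.Pairwise (· < ·)) :
    ∀ rest pfx (m : PySem.Dict Int Int), ks = pfx ++ rest →
    (∀ w, m.getD w 0 = vgM c k (vgR c k ks) pfx w) →
    (aOuter k rest m = true ↔
      ∀ p2 v suf, rest = p2 ++ v :: suf → vgR c k ks v ≠ 0 →
        ∀ i ∈ PySem.List.pyRange 1 k 1, vgR c k ks v ≤ vgM c k (vgR c k ks) (pfx ++ p2) (v + i)) := by
  intro rest
  induction rest with
  | nil =>
    intro pfx m hks hinv
    simp only [aOuter]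
    constructor
    · intro _ p2 v suf hdec
      exact absurd hdec.symm (by simp)
    · intro _; trivial
  | cons val rest' ih =>
    intro pfx m hks hinv
    have hRv := vgM_self c k hsort hks
    have hfreq : m.getD val 0 = vgR c k ks val := by rw [hinv, hRv]
    have hks' : ks = (pfx ++ [val]) ++ rest' := by rw [hks]; simp
    rw [vg_decomp_shift (fun p2 v suf => vgR c k ks v ≠ 0 →
        ∀ i ∈ PySem.List.pyRange 1 k 1, vgR c k ks v ≤ vgM c k (vgR c k ks) (pfx ++ p2) (v + i))]
    by_cases h0 : vgR c k ks val = 0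
    · have hbeq : (m.getD val 0 == 0) = true := by rw [hfreq, h0]; rfl
      have hstep : aOuter k (val :: rest') m = aOuter k rest' m := by
        simp [aOuter, hbeq]
      have hinv' : ∀ w, m.getD w 0 = vgM c k (vgR c k ks) (pfx ++ [val]) w := by
        intro w
        rw [hinv w, vgM_append_singleton, h0]
        simp
      rw [hstep, ih (pfx ++ [val]) m hks' hinv']
      constructor
      · intro hall
        refine ⟨fun hne => absurd h0 hne, ?_⟩
        intro p2 v suf hd hne i hi
        have := hall p2 v suf hd hne i hi
        rwa [List.append_cons pfx val p2]
      · intro hall p2 v suf hd hne i hi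
        have := hall.2 p2 v suf hd hne i hi
        rwa [List.append_cons pfx val p2] at this
    · have hbeq : (m.getD val 0 == 0) = false := by
        rw [hfreq]
        simpa using h0
      have hbridge : aInner m val (m.getD val 0) 1 (k - 1).toNat
          = aInnerL m val (m.getD val 0) (PySem.List.pyRange 1 k 1) := by
        rw [aInner_eq_list val (m.getD val 0) ((k - 1).toNat) 1 m, range_shift k]
      have hchar := aInnerL_char k (vgM c k (vgR c k ks) pfx) val (m.getD val 0)
        (PySem.List.pyRange 1 k 1) [] m (by simp) (by intro w; rw [hinv w]; simp)
      rcases hchar with ⟨⟨m', hsome, hfin⟩, hpass⟩ | ⟨hnone, hfail⟩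
      · have hstep : aOuter k (val :: rest') m = aOuter k rest' m' := by
          simp only [aOuter]
          rw [if_neg (by simp [hbeq] : ¬ (m.getD val 0 == 0) = true)]
          rw [hbridge, hsome]
        have hinv' : ∀ w, m'.getD w 0 = vgM c k (vgR c k ks) (pfx ++ [val]) w := by
          intro w
          rw [hfin w, vgM_append_singleton, hfreq]
        rw [hstep, ih (pfx ++ [val]) m' hks' hinv']
        constructor
        · intro hall
          refine ⟨?_, ?_⟩
          · intro _ i hi
            have := hpass i hi
            rw [hfreq] at this
            simpa using this
          · intro p2 v suf hd hne i hi
            have := hall p2 v suf hd hne i hi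
            rwa [List.append_cons pfx val p2]
        · intro hall p2 v suf hd hne i hi
          have := hall.2 p2 v suf hd hne i hi
          rwa [List.append_cons pfx val p2] at this
      · have hstep : aOuter k (val :: rest') m = false := by
          simp only [aOuter]
          rw [if_neg (by simp [hbeq] : ¬ (m.getD val 0 == 0) = true)]
          rw [hbridge, hnone]
        rw [hstep]
        simp only [Bool.false_eq_true, false_iff]
        intro hall
        apply hfail
        intro i hi
        have := hall.1 h0 i hi
        rw [hfreq]
        simpa using this

theorem charA (arr : List Int) (k : Int) :
    (validgroup arr k = true ↔
      vgGoodQ (fun w => ((arr.count w : Nat) : Int)) k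
        (PySem.List.sorted (PySem.Set.ofList arr) (fun x => x) false)) := by
  rw [show validgroup arr k
      = aOuter k (PySem.List.sorted (PySem.Dict.counter arr).keys (fun x => x) false)
          (PySem.Dict.counter arr) from rfl,
    PySem.Dict.keys_counter]
  set c : Int → Int := fun w => ((arr.count w : Nat) : Int) with hc
  set ks := PySem.List.sorted (PySem.Set.ofList arr) (fun x => x) false with hksdef
  have hchar := aOuter_char c k ks (vg_sorted_lt arr) ks [] (PySem.Dict.counter arr)
    (by simp) ?hinv
  case hinv =>
    intro w
    rw [PySem.Dict.getD_counter, vgM]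
    simp [hc]
  rw [hchar]
  unfold vgGoodQ
  constructor
  · intro h pfx v suf hd hne i hi
    have := h pfx v suf hd hne i hi
    simpa using this
  · intro h pfx v suf hd hne i hi
    have := h pfx v suf hd hne i hi
    simpa using this

-- ===== B-side characterisation =====
theorem zip_self_map (l : List Int) (f : Int → Int) :
    l.zip (l.map f) = l.map (fun a => (a, f a)) := by
  induction l with
  | nil => rfl
  | cons a t ih => simp [ih]

theorem bFirst_char (c : Int → Int) (k : Int) (ks : List Int)
    (hsort : ks.Pairwise (· < ·)) (cnt : PySem.Dict Int Int)
    (hcnt : ∀ v, cnt.getD v 0 = c v) :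
    ∀ rest pfx (win : List (Int × Int)) (S : Int) (sacc : List Int), ks = pfx ++ rest →
    (∀ v rest', rest = v :: rest' → ∃ cut, cut ≤ v - k ∧
        win = (pfx.filter (fun u => decide (cut < u))).map (fun u => (u, vgR c k ks u)) ∧
        S = ((pfx.filter (fun u => decide (cut < u))).map (fun u => vgR c k ks u)).sum) →
    sacc = pfx.map (fun u => vgR c k ks u) →
    ((∃ st, bFirst cnt k rest win S sacc = some st ∧ st = ks.map (fun u => vgR c k ks u)) ∧
      (∀ v ∈ rest, 0 ≤ vgR c k ks v))
    ∨ (bFirst cnt k rest win S sacc = none ∧ ¬ (∀ v ∈ rest, 0 ≤ vgR c k ks v)) := by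
  intro rest
  induction rest with
  | nil =>
    intro pfx win S sacc hks _ hsacc
    left
    refine ⟨⟨sacc, rfl, ?_⟩, by simp⟩
    rw [hsacc]
    rw [List.append_nil] at hks
    rw [hks]
  | cons v rest' ih =>
    intro pfx win S sacc hks hwin hsacc
    rcases hwin v rest' rfl with ⟨cut, hcut, hwineq, hSeq⟩
    have hs2 := hsort
    rw [hks] at hs2
    have hpfxlt : ∀ u ∈ pfx, u < v := fun u hu =>
      (List.pairwise_append.mp hs2).2.2 u hu v List.mem_cons_self
    have hpw : win.Pairwise (fun p q => p.1 < q.1) := by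
      rw [hwineq, List.pairwise_map]
      exact List.Pairwise.sublist List.filter_sublist (List.pairwise_append.mp hs2).1
    have hpop := bPop_spec (v - k) win S hpw
    have hwin' : (bPop (v - k) win S).1
        = (pfx.filter (fun u => decide (v - k < u))).map (fun u => (u, vgR c k ks u)) := by
      rw [hpop]
      dsimp only
      rw [hwineq, List.filter_map, List.filter_filter]
      refine congrArg _ (List.filter_congr ?_)
      intro u _
      by_cases h2 : v - k < u
      · have h3 : cut < u := by omega
        simp [h2, h3]
      · simp [h2]
    have hS' : (bPop (v - k) win S).2
        = ((pfx.filter (fun u => decide (v - k < u))).map (fun u => vgR c k ks u)).sum := by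
      rw [hpop]
      dsimp only
      rw [hwineq, List.filter_map, List.map_map, hSeq]
      have hsplit := sum_map_filter_split (pfx.filter (fun u => decide (cut < u)))
        (fun u => decide (u ≤ v - k)) (fun u => vgR c k ks u)
      have hneg : ((pfx.filter (fun u => decide (cut < u))).filter
            (fun u => !(decide (u ≤ v - k))))
          = pfx.filter (fun u => decide (v - k < u)) := by
        rw [List.filter_filter]
        apply List.filter_congr
        intro u _
        by_cases h2 : v - k < u
        · have h3 : cut < u := by omega
          have h4 : ¬ u ≤ v - k := by omega
          simp [h2, h3, h4]
        · have h4 : u ≤ v - k := by omega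
          simp [h2, h4]
      rw [hneg] at hsplit
      have hcomp : ((pfx.filter (fun u => decide (cut < u))).filter
            ((fun q => decide (q.1 ≤ v - k)) ∘ (fun u => (u, vgR c k ks u))))
          = (pfx.filter (fun u => decide (cut < u))).filter (fun u => decide (u ≤ v - k)) := rfl
      rw [hcomp]
      have hcomp2 : ((·.2) ∘ (fun u => (u, vgR c k ks u))) = (fun u => vgR c k ks u) := rfl
      rw [hcomp2]
      omega
    have hdec : ks = pfx ++ v :: rest' := hks
    have hRv : cnt.getD v 0 - (bPop (v - k) win S).2 = vgR c k ks v := by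
      rw [hS', hcnt v]
      have hfc : pfx.filter (fun u => decide ((v - u) ∈ PySem.List.pyRange 1 k 1))
          = pfx.filter (fun u => decide (v - k < u)) := by
        apply List.filter_congr
        intro u hu
        have hul := hpfxlt u hu
        by_cases h2 : v - k < u
        · have h3 : (v - u) ∈ PySem.List.pyRange 1 k 1 := by
            rw [PySem.List.mem_pyRange_one]; omega
          simp [h2, h3]
        · have h3 : (v - u) ∉ PySem.List.pyRange 1 k 1 := by
            rw [PySem.List.mem_pyRange_one]; omega
          simp [h2, h3]
      rw [← hfc, ← sum_map_ite_filter pfx (fun u => (v - u) ∈ PySem.List.pyRange 1 k 1)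
          (fun u => vgR c k ks u)]
      rw [← vgM_self c k hsort hdec]
      rfl
    by_cases hneg2 : vgR c k ks v < 0
    · right
      constructor
      · show (if cnt.getD v 0 - (bPop (v - k) win S).2 < 0 then none
            else bFirst cnt k rest' ((bPop (v - k) win S).1 ++ [(v, cnt.getD v 0 - (bPop (v - k) win S).2)])
              ((bPop (v - k) win S).2 + (cnt.getD v 0 - (bPop (v - k) win S).2))
              (sacc ++ [cnt.getD v 0 - (bPop (v - k) win S).2])) = none
        rw [if_pos (by rw [hRv]; exact hneg2)]
      · intro hall
        have := hall v List.mem_cons_self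
        omega
    · have hstep : bFirst cnt k (v :: rest') win S sacc
          = bFirst cnt k rest' ((bPop (v - k) win S).1 ++ [(v, vgR c k ks v)])
              ((bPop (v - k) win S).2 + vgR c k ks v) (sacc ++ [vgR c k ks v]) := by
        show (if cnt.getD v 0 - (bPop (v - k) win S).2 < 0 then none
            else bFirst cnt k rest' ((bPop (v - k) win S).1 ++ [(v, cnt.getD v 0 - (bPop (v - k) win S).2)])
              ((bPop (v - k) win S).2 + (cnt.getD v 0 - (bPop (v - k) win S).2))
              (sacc ++ [cnt.getD v 0 - (bPop (v - k) win S).2])) = _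
        rw [hRv, if_neg (by omega)]
      have hks' : ks = (pfx ++ [v]) ++ rest' := by rw [hks]; simp
      have hsacc' : sacc ++ [vgR c k ks v] = (pfx ++ [v]).map (fun u => vgR c k ks u) := by
        rw [hsacc]; simp
      have hwin2 : ∀ v2 rest'', rest' = v2 :: rest'' → ∃ cut2, cut2 ≤ v2 - k ∧
          (bPop (v - k) win S).1 ++ [(v, vgR c k ks v)]
            = ((pfx ++ [v]).filter (fun u => decide (cut2 < u))).map (fun u => (u, vgR c k ks u)) ∧
          (bPop (v - k) win S).2 + vgR c k ks v
            = (((pfx ++ [v]).filter (fun u => decide (cut2 < u))).map (fun u => vgR c k ks u)).sum := by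
        intro v2 rest'' hr
        have hv2 : v < v2 :=
          (List.pairwise_cons.mp (List.pairwise_append.mp hs2).2.1).1 v2
            (by rw [hr]; exact List.mem_cons_self)
        have hM1 : (1 : Int) ≤ max k 1 := le_max_right k 1
        have hMk : k ≤ max k 1 := le_max_left k 1
        have hM : max k 1 = k ∨ max k 1 = 1 := max_choice k 1
        have hfl : pfx.filter (fun u => decide (v - max k 1 < u))
            = pfx.filter (fun u => decide (v - k < u)) := by
          apply List.filter_congr
          intro u hu
          have hul := hpfxlt u hu
          by_cases h2 : v - max k 1 < u
          · have h3 : v - k < u := by rcases hM with hM | hM <;> omega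
            simp [h2, h3]
          · have h3 : ¬ (v - k < u) := by rcases hM with hM | hM <;> omega
            simp [h2, h3]
        have hfv : [v].filter (fun u => decide (v - max k 1 < u)) = [v] := by
          have hlt : v - max k 1 < v := by omega
          simp [hlt]
        refine ⟨v - max k 1, by omega, ?_, ?_⟩
        · rw [List.filter_append, hfl, hfv, List.map_append, hwin']
          simp
        · rw [List.filter_append, hfl, hfv, List.map_append, List.sum_append, hS']
          simp
      rcases ih (pfx ++ [v]) _ _ _ hks' hwin2 hsacc' with ⟨⟨st, hd, hst⟩, hnn⟩ | ⟨hnone, hfail⟩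
      · left
        refine ⟨⟨st, by rw [hstep]; exact hd, hst⟩, ?_⟩
        intro x hx
        rcases List.mem_cons.mp hx with h1 | h1
        · subst h1; omega
        · exact hnn x h1
      · right
        refine ⟨by rw [hstep]; exact hnone, ?_⟩
        intro hall
        exact hfail (fun x hx => hall x (List.mem_cons_of_mem _ hx))

theorem bSecond_char (cnt : PySem.Dict Int Int) (k : Int) (ks : List Int)
    (hmem : ∀ w, cnt.contains w = true ↔ w ∈ ks) :
    ∀ l : List (Int × Int), bSecond cnt k l = true ↔
      ∀ p ∈ l, 0 < p.2 → ∀ j ∈ PySem.List.pyRange 1 k 1, (p.1 + j) ∈ ks := by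
  intro l
  induction l with
  | nil => simp [bSecond]
  | cons p rest ih =>
    rcases p with ⟨v, s⟩
    have hbc : bCover cnt v 1 (k - 1).toNat
        = !((PySem.List.pyRange 1 k 1).any (fun i => !(cnt.contains (v + i)))) := by
      rw [bCover_eq cnt v ((k - 1).toNat) 1, range_shift k]
    by_cases hpos : 0 < s
    · by_cases hany : ((PySem.List.pyRange 1 k 1).any (fun i => !(cnt.contains (v + i)))) = true
      · have hstep : bSecond cnt k ((v, s) :: rest) = false := by
          simp only [bSecond]
          rw [if_pos hpos, hbc, hany]
          simp
        rw [hstep]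
        simp only [Bool.false_eq_true, false_iff]
        intro hall
        rcases List.any_eq_true.mp hany with ⟨j, hj, hcj⟩
        have := hall (v, s) List.mem_cons_self hpos j hj
        have hct := (hmem (v + j)).mpr this
        rw [hct] at hcj
        simp at hcj
      · have hstep : bSecond cnt k ((v, s) :: rest) = bSecond cnt k rest := by
          simp only [bSecond]
          rw [if_pos hpos, hbc, eq_false_of_ne_true hany]
          simp
        rw [hstep, ih]
        have hcov : ∀ j ∈ PySem.List.pyRange 1 k 1, (v + j) ∈ ks := by
          intro j hj
          have hanyf := List.any_eq_false.mp (eq_false_of_ne_true hany) j hj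
          exact (hmem (v + j)).mp (by revert hanyf; cases cnt.contains (v + j) <;> simp)
        constructor
        · intro h x hx
          rcases List.mem_cons.mp hx with h1 | h1
          · subst h1; intro _; exact hcov
          · exact h x h1
        · intro h x hx
          exact h x (List.mem_cons_of_mem _ hx)
    · have hstep : bSecond cnt k ((v, s) :: rest) = bSecond cnt k rest := by
        simp only [bSecond]
        rw [if_neg hpos]
      rw [hstep, ih]
      constructor
      · intro h x hx
        rcases List.mem_cons.mp hx with h1 | h1
        · subst h1; intro hc; exact absurd hc hpos
        · exact h x h1
      · intro h x hx
        exact h x (List.mem_cons_of_mem _ hx)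

theorem charB (arr : List Int) (k : Int) :
    (validgroup_alt arr k = true ↔
      vgGoodP (fun w => ((arr.count w : Nat) : Int)) k
        (PySem.List.sorted (PySem.Set.ofList arr) (fun x => x) false)) := by
  rw [show validgroup_alt arr k
      = (match bFirst (PySem.Dict.counter arr) k
            (PySem.List.sorted (PySem.Dict.counter arr).keys (fun x => x) false) [] 0 [] with
        | none => false
        | some starts => bSecond (PySem.Dict.counter arr) k
            ((PySem.List.sorted (PySem.Dict.counter arr).keys (fun x => x) false).zip starts))
      from rfl,
    PySem.Dict.keys_counter]
  set c : Int → Int := fun w => ((arr.count w : Nat) : Int) with hc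
  set ks := PySem.List.sorted (PySem.Set.ofList arr) (fun x => x) false with hksdef
  have hmem : ∀ w, (PySem.Dict.counter arr).contains w = true ↔ w ∈ ks := by
    intro w
    rw [PySem.Dict.contains_counter]
    rw [hksdef, vg_sorted_mem]
    simp
  rcases bFirst_char c k ks (vg_sorted_lt arr) (PySem.Dict.counter arr)
      (fun v => PySem.Dict.getD_counter arr v) ks [] [] 0 [] rfl
      (by intro v rest' _; exact ⟨v - k, le_refl _, by simp, by simp⟩)
      (by simp) with ⟨⟨st, hd, hst⟩, hnn⟩ | ⟨hnone, hfail⟩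
  · rw [hd]
    show bSecond (PySem.Dict.counter arr) k (ks.zip st) = true ↔ _
    rw [hst, zip_self_map ks (fun u => vgR c k ks u)]
    rw [bSecond_char (PySem.Dict.counter arr) k ks hmem]
    unfold vgGoodP
    constructor
    · intro h
      refine ⟨hnn, ?_⟩
      intro v hv hpos j hj
      exact h (v, vgR c k ks v) (List.mem_map_of_mem hv) hpos j hj
    · intro h p hp hpos j hj
      rcases List.mem_map.mp hp with ⟨v, hv, hpv⟩
      have hv1 : p.1 = v := by rw [← hpv]
      have hv2 : p.2 = vgR c k ks v := by rw [← hpv]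
      rw [hv1]
      exact h.2 v hv (by rw [← hv2]; exact hpos) j hj
  · rw [hnone]
    simp only [Bool.false_eq_true, false_iff]
    intro hP
    exact hfail (fun v hv => hP.1 v hv)

-- ===== the two characterisations agree =====
theorem vg_sum_bound (c : Int → Int) (k : Int) (ks : List Int)
    (hcnn : ∀ w, 0 ≤ c w) (hQ : vgGoodQ c k ks)
    {pfx suf : List Int} {v : Int} (hdec : ks = pfx ++ v :: suf) :
    ∀ l q, pfx = l ++ q →
      (l.map (fun u => if (v - u) ∈ PySem.List.pyRange 1 k 1 then vgR c k ks u else 0)).sum ≤ c v := by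
  intro l
  induction l using List.reverseRecOn with
  | nil => intro q _; simpa using hcnn v
  | append_singleton l' u ihl =>
    intro q hpfx
    rw [List.map_append, List.sum_append]
    have hsing : (([u].map (fun u => if (v - u) ∈ PySem.List.pyRange 1 k 1 then vgR c k ks u else 0)).sum)
        = (if (v - u) ∈ PySem.List.pyRange 1 k 1 then vgR c k ks u else 0) := by simp
    rw [hsing]
    have hrec := ihl ([u] ++ q) (by rw [hpfx]; simp)
    by_cases hin : (v - u) ∈ PySem.List.pyRange 1 k 1
    · by_cases hRu : vgR c k ks u = 0
      · rw [if_pos hin, hRu]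
        omega
      · have hdec2 : ks = l' ++ u :: (q ++ v :: suf) := by rw [hdec, hpfx]; simp
        have hQ2 := hQ l' u (q ++ v :: suf) hdec2 hRu (v - u) hin
        have huv : u + (v - u) = v := by ring
        rw [huv] at hQ2
        unfold vgM at hQ2
        rw [if_pos hin]
        omega
    · rw [if_neg hin]
      omega

theorem vgQ_to_Pa (c : Int → Int) (k : Int) (ks : List Int)
    (hsort : ks.Pairwise (· < ·)) (hcnn : ∀ w, 0 ≤ c w) (hQ : vgGoodQ c k ks) :
    ∀ v ∈ ks, 0 ≤ vgR c k ks v := by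
  have main : ∀ n pfx v suf, pfx.length = n → ks = pfx ++ v :: suf → 0 ≤ vgR c k ks v := by
    intro n
    induction n using Nat.strong_induction_on with
    | _ n ihn =>
      intro pfx v suf hlen hdec
      have hpos : ∀ u ∈ pfx, 0 ≤ vgR c k ks u := by
        intro u hu
        rcases List.append_of_mem hu with ⟨l1, l2, hpfx⟩
        have hlt : l1.length < n := by
          subst hlen
          rw [hpfx, List.length_append, List.length_cons]
          omega
        have hdec2 : ks = l1 ++ u :: (l2 ++ v :: suf) := by rw [hdec, hpfx]; simp
        exact ihn l1.length hlt l1 u _ rfl hdec2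
      have hsb := vg_sum_bound c k ks hcnn hQ hdec pfx [] (by simp)
      have hms := vgM_self c k hsort hdec
      unfold vgM at hms
      omega
  intro v hv
  rcases List.append_of_mem hv with ⟨l1, l2, h⟩
  exact main l1.length l1 v l2 rfl h

theorem vgQ_iff_P (c : Int → Int) (k : Int) (ks : List Int)
    (hsort : ks.Pairwise (· < ·)) (hcnn : ∀ w, 0 ≤ c w)
    (hc0 : ∀ w, w ∉ ks → c w = 0) :
    (vgGoodQ c k ks ↔ vgGoodP c k ks) := by
  constructor
  · intro hQ
    have hPa := vgQ_to_Pa c k ks hsort hcnn hQ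
    refine ⟨hPa, ?_⟩
    intro v hv hpos j hj
    rcases List.append_of_mem hv with ⟨pfx, suf, hdec⟩
    have hQ2 := hQ pfx v suf hdec (by omega) j hj
    have hsub : ∀ u ∈ pfx, u ∈ ks := by
      intro u hu; rw [hdec]; exact List.mem_append_left _ hu
    have hsum : 0 ≤ (pfx.map (fun u =>
        if ((v + j) - u) ∈ PySem.List.pyRange 1 k 1 then vgR c k ks u else 0)).sum := by
      apply List.sum_nonneg
      intro x hx
      rcases List.mem_map.mp hx with ⟨u, hu, hxu⟩
      rw [← hxu]
      by_cases hc2 : ((v + j) - u) ∈ PySem.List.pyRange 1 k 1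
      · rw [if_pos hc2]; exact hPa u (hsub u hu)
      · rw [if_neg hc2]
    unfold vgM at hQ2
    by_contra hnot
    have hz := hc0 (v + j) hnot
    omega
  · rintro ⟨hPa, hPb⟩
    intro pfx v suf hdec hne j hj
    have hvks : v ∈ ks := by
      rw [hdec]; exact List.mem_append_right _ List.mem_cons_self
    have hpos : 0 < vgR c k ks v := lt_of_le_of_ne (hPa v hvks) (Ne.symm hne)
    have hwks : (v + j) ∈ ks := hPb v hvks hpos j hj
    have hj1 : 1 ≤ j := (PySem.List.mem_pyRange_one.mp hj).1
    have hs2 := hsort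
    rw [hdec] at hs2
    have hwsuf : (v + j) ∈ suf := by
      rw [hdec] at hwks
      rcases List.mem_append.mp hwks with h1 | h1
      · exfalso
        have := (List.pairwise_append.mp hs2).2.2 _ h1 v List.mem_cons_self
        omega
      · rcases List.mem_cons.mp h1 with h2 | h2
        · omega
        · exact h2
    rcases List.append_of_mem hwsuf with ⟨mid, suf2, hsufdec⟩
    have hdec2 : ks = (pfx ++ v :: mid) ++ (v + j) :: suf2 := by
      rw [hdec, hsufdec]; simp
    have hMw := vgM_self c k hsort hdec2
    unfold vgM at hMw ⊢
    rw [List.map_append, List.sum_append] at hMw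
    have hcons : ((v :: mid).map (fun u =>
        if ((v + j) - u) ∈ PySem.List.pyRange 1 k 1 then vgR c k ks u else 0)).sum
        = (if ((v + j) - v) ∈ PySem.List.pyRange 1 k 1 then vgR c k ks v else 0)
          + ((mid.map (fun u =>
            if ((v + j) - u) ∈ PySem.List.pyRange 1 k 1 then vgR c k ks u else 0)).sum) := by
      simp
    rw [hcons] at hMw
    have hvj : v + j - v = j := by ring
    rw [hvj, if_pos hj] at hMw
    have hmid : 0 ≤ (mid.map (fun u =>
        if ((v + j) - u) ∈ PySem.List.pyRange 1 k 1 then vgR c k ks u else 0)).sum := by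
      apply List.sum_nonneg
      intro x hx
      rcases List.mem_map.mp hx with ⟨u, hu, hxu⟩
      rw [← hxu]
      have huks : u ∈ ks := by
        rw [hdec]
        exact List.mem_append_right _ (List.mem_cons_of_mem _ (hsufdec ▸ List.mem_append_left _ hu))
      by_cases hc2 : ((v + j) - u) ∈ PySem.List.pyRange 1 k 1
      · rw [if_pos hc2]; exact hPa u huks
      · rw [if_neg hc2]
    have hRw : 0 ≤ vgR c k ks (v + j) := hPa _ hwks
    omega

-- ===== VERDICT (by name: the statement is the Claim_ definition above) =====
theorem validgroup_spec : Claim_equal_validgroup := by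
  intro arr k _
  unfold Spec_validgroup
  have hA := charA arr k
  have hB := charB arr k
  have hQP := vgQ_iff_P (fun w => ((arr.count w : Nat) : Int)) k
      (PySem.List.sorted (PySem.Set.ofList arr) (fun x => x) false)
      (vg_sorted_lt arr)
      (by intro w; positivity)
      (by intro w hw
          have : w ∉ arr := by simpa [vg_sorted_mem] using hw
          simp [List.count_eq_zero_of_not_mem this])
  have : validgroup arr k = true ↔ validgroup_alt arr k = true := by
    rw [hA, hB, hQP]
  exact Bool.eq_iff_iff.mpr this
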